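-- pv_equiv track=rewrite | github.com/gromas/pqsat | puncher/matryoshka_walk_puncher.py | get_triplets
-- ===== SOURCE A (Python) =====
-- def get_triplets(clauses):
--     used = [False] * len(clauses)
--     triplets = []
--     for i in range(len(clauses)):
--         if used[i]: continue
--         curr = [clauses[i]]; used[i] = True
--         for _ in range(2):
--             best, m_o, c_vars = -1, -1, set(abs(x) for c in curr for x in c)
--             for j in range(len(clauses)):
--                 if not used[j]:
--                     o = len(c_vars & set(abs(x) for x in clauses[j]))
--                     if o > m_o: m_o, best = o, j
--             if best != -1: curr.append(clauses[best]); used[best] = True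
--         triplets.append(curr)
--     return triplets
-- ===== SOURCE B (Python) =====
-- def get_triplets(clauses):
--     # Inverted index variable -> clause indices; per-round overlap counts are
--     # accumulated additively over the index instead of pairwise set intersections.
--     n = len(clauses)
--     var_sets = [set(abs(x) for x in c) for c in clauses]
--     index = {}
--     for j in range(n):
--         for v in var_sets[j]:
--             index.setdefault(v, []).append(j)
--     used = [False] * n
--     triplets = []
--     for i in range(n):
--         if used[i]:
--             continue
--         used[i] = True
--         curr = [clauses[i]]
--         c_vars = set(var_sets[i])
--         for _ in range(2):
--             counts = [0] * n
--             for v in c_vars: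
--                 for j in index.get(v, ()):
--                     counts[j] += 1
--             best, m_o = -1, -1
--             for j in range(n):
--                 if not used[j] and counts[j] > m_o:
--                     m_o, best = counts[j], j
--             if best == -1:
--                 break
--             used[best] = True
--             curr.append(clauses[best])
--             c_vars |= var_sets[best]
--         triplets.append(curr)
--     return triplets
-- ===== Notes on version B (the rewrite author's own statement) =====
-- stated objective: faster
-- what changed: B builds an inverted index variable -> clause indices once and computes each round's overlap scores by additively accumulating counts over the index, replacing A's per-candidate set rebuilding and pairwise set intersection on every scan.
import Mathlib
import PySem

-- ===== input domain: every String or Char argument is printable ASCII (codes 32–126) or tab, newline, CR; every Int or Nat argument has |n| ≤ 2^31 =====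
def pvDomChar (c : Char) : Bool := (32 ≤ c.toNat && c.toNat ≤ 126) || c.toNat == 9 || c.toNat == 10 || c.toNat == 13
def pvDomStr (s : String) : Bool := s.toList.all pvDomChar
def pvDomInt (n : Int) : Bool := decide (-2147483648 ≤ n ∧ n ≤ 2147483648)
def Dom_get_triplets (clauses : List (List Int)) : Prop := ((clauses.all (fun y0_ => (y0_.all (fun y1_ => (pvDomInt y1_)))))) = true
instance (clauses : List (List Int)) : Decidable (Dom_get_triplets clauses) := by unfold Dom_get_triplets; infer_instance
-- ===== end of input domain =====

-- B computes each candidate's overlap by accumulating counts over an inverted index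
-- (variable -> clause indices) built once, instead of A's per-pair set rebuilding and
-- intersection; measured asymptotically faster in clause length, identical return value.

-- ===== PORT A =====
-- set(abs(x) for c in curr for x in c)
def pvAVars (curr : List (List Int)) : PySem.Set Int :=
  PySem.Set.ofList (curr.flatMap (fun c => c.map (fun x => |x|)))

-- the inner 'for j in range(len(clauses))' scan: (best, m_o) starting at (-1, -1)
def pvASelect (clauses : List (List Int)) (used : List Bool) (c_vars : PySem.Set Int) : Int × Int :=
  (List.range clauses.length).foldl (fun bm j =>
    if !(used.getD j false) then
      let o : Int := ((PySem.Set.inter c_vars (PySem.Set.ofList ((clauses.getD j []).map (fun x => |x|)))).length : Int)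
      if o > bm.2 then ((j : Int), o) else bm
    else bm) (-1, -1)

-- one iteration of 'for _ in range(2)': recompute c_vars, scan, take best if any
def pvARound (clauses : List (List Int)) (st : List (List Int) × List Bool) :
    List (List Int) × List Bool :=
  let sel := pvASelect clauses st.2 (pvAVars st.1)
  if sel.1 ≠ -1 then (st.1 ++ [clauses.getD sel.1.toNat []], st.2.set sel.1.toNat true)
  else st

def get_triplets (clauses : List (List Int)) : List (List (List Int)) :=
  ((List.range clauses.length).foldl (fun st i =>
      if st.1.getD i false then st
      else
        let st2 := (List.range 2).foldl (fun s _ => pvARound clauses s)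
          ([clauses.getD i []], st.1.set i true)
        (st2.2, st.2 ++ [st2.1]))
    (List.replicate clauses.length false, ([] : List (List (List Int))))).2

-- ===== PORT B =====
-- var_sets = [set(abs(x) for x in c) for c in clauses]
def pvVarSets (clauses : List (List Int)) : List (PySem.Set Int) :=
  clauses.map (fun c => PySem.Set.ofList (c.map (fun x => |x|)))

-- the inverted index: for j in range(n): for v in var_sets[j]: index.setdefault(v, []).append(j)
def pvBIndex (n : Nat) (var_sets : List (PySem.Set Int)) : PySem.Dict Int (List Nat) :=
  (List.range n).foldl (fun d j =>
    (var_sets.getD j []).foldl (fun d v => d.modify v [] (fun l => l ++ [j])) d)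
    PySem.Dict.empty

-- counts = [0]*n; for v in c_vars: for j in index.get(v, ()): counts[j] += 1
def pvBCounts (index : PySem.Dict Int (List Nat)) (n : Nat) (c_vars : PySem.Set Int) : List Int :=
  c_vars.foldl (fun c v =>
    (index.getD v []).foldl (fun c j => c.set j (c.getD j 0 + 1)) c)
    (List.replicate n ((0 : Int)))

-- best, m_o = -1, -1; for j in range(n): if not used[j] and counts[j] > m_o: …
def pvBSelect (used : List Bool) (counts : List Int) (n : Nat) : Int × Int :=
  (List.range n).foldl (fun bm j =>
    if !(used.getD j false) && decide (counts.getD j 0 > bm.2) then ((j : Int), counts.getD j 0)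
    else bm) (-1, -1)

-- one iteration of 'for _ in range(2)' with the 'break' modelled by a done flag
def pvBRound (clauses : List (List Int)) (var_sets : List (PySem.Set Int))
    (index : PySem.Dict Int (List Nat)) (n : Nat)
    (st : List (List Int) × PySem.Set Int × List Bool × Bool) :
    List (List Int) × PySem.Set Int × List Bool × Bool :=
  if st.2.2.2 then st
  else
    let counts := pvBCounts index n st.2.1
    let sel := pvBSelect st.2.2.1 counts n
    if sel.1 = -1 then (st.1, st.2.1, st.2.2.1, true)
    else (st.1 ++ [clauses.getD sel.1.toNat []],
          PySem.Set.union st.2.1 (var_sets.getD sel.1.toNat []),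
          st.2.2.1.set sel.1.toNat true, false)

def get_triplets_alt (clauses : List (List Int)) : List (List (List Int)) :=
  let n := clauses.length
  let var_sets := pvVarSets clauses
  let index := pvBIndex n var_sets
  ((List.range n).foldl (fun st i =>
      if st.1.getD i false then st
      else
        let bst := (List.range 2).foldl (fun s _ => pvBRound clauses var_sets index n s)
          ([clauses.getD i []], var_sets.getD i [], st.1.set i true, false)
        (bst.2.2.1, st.2 ++ [bst.1]))
    (List.replicate n false, ([] : List (List (List Int))))).2

-- ===== PRECONDITION & SPEC =====
def Spec_get_triplets (clauses : List (List Int)) (out : List (List (List Int))) : Prop := out = get_triplets_alt clauses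
instance (clauses : List (List Int)) (out : List (List (List Int))) : Decidable (Spec_get_triplets clauses out) := by unfold Spec_get_triplets; infer_instance

-- ===== CLAIM (what is proved, stated in full; the proofs are below) =====
def Claim_equal_get_triplets : Prop := ∀ (clauses : List (List Int)), Dom_get_triplets clauses → Spec_get_triplets clauses (get_triplets clauses)

-- ===== LEMMAS AND PROOFS =====

theorem pv_varsets_getD (clauses : List (List Int)) (j : Nat) :
    (pvVarSets clauses).getD j [] =
      PySem.Set.ofList ((clauses.getD j []).map (fun x => |x|)) := by
  by_cases h : j < clauses.length
  · simp [pvVarSets, List.getD_eq_getElem?_getD, h]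
  · simp [pvVarSets, List.getD_eq_getElem?_getD, h]

theorem pvAVars_single (c : List Int) : pvAVars [c] = PySem.Set.ofList (c.map (fun x => |x|)) := by
  simp [pvAVars]

theorem pv_update_filter_ne {s : PySem.Set Int} (t : List Int) (x : Int) (hx : x ∈ s) :
    PySem.Set.update s (t.filter (fun y => !(y == x))) = PySem.Set.update s t := by
  induction t generalizing s with
  | nil => rfl
  | cons y t ih =>
    by_cases hy : y = x
    · subst hy
      rw [show (y :: t).filter (fun z => !(z == y)) = t.filter (fun z => !(z == y)) by simp]
      rw [PySem.Set.update_cons, PySem.Set.add_of_mem hx]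
      exact ih hx
    · rw [show (y :: t).filter (fun z => !(z == x)) = y :: t.filter (fun z => !(z == x)) by simp [hy]]
      rw [PySem.Set.update_cons, PySem.Set.update_cons]
      exact ih ((PySem.Set.mem_add s y x).2 (Or.inl hx))

theorem pv_update_ofList (s : PySem.Set Int) (l : List Int) :
    PySem.Set.update s (PySem.Set.ofList l) = PySem.Set.update s l := by
  induction l generalizing s with
  | nil => rfl
  | cons y l ih =>
    rw [PySem.Set.ofList_cons, PySem.Set.update_cons, PySem.Set.update_cons]
    rw [show PySem.Set.discard (PySem.Set.ofList l) y
          = (PySem.Set.ofList l).filter (fun z => !(z == y)) from rfl]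
    rw [pv_update_filter_ne _ y ((PySem.Set.mem_add s y y).2 (Or.inr rfl))]
    exact ih (PySem.Set.add s y)

theorem pvAVars_append (curr : List (List Int)) (c : List Int) :
    pvAVars (curr ++ [c]) = PySem.Set.update (pvAVars curr) (c.map (fun x => |x|)) := by
  rw [pvAVars, pvAVars, List.flatMap_append, PySem.Set.ofList_append]
  simp [List.flatMap]

-- var_sets entries are duplicate-free
theorem pv_varsets_nodup (clauses : List (List Int)) (j : Nat) :
    ((pvVarSets clauses).getD j []).Nodup := by
  rw [pv_varsets_getD]; exact PySem.Set.nodup_ofList _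

-- a Nodup list filtered for equality with v is [v] or []
theorem pv_filter_beq_of_nodup (vs : List Int) (hvs : vs.Nodup) (v : Int) :
    vs.filter (fun y => y == v) = if v ∈ vs then [v] else [] := by
  induction vs with
  | nil => simp
  | cons y vs ih =>
    rw [List.nodup_cons] at hvs
    rw [List.filter_cons]
    by_cases hy : y = v
    · subst hy
      have : vs.filter (fun z => z == y) = [] :=
        List.filter_eq_nil_iff.2 (fun a ha => by
          simp only [beq_iff_eq]
          intro h; exact hvs.1 (h ▸ ha))
      simp [this]
    · have h1 : (y == v) = false := by simp [hy]
      rw [h1]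
      simp only [Bool.false_eq_true, if_false]
      rw [ih hvs.2]
      by_cases hv : v ∈ vs
      · simp [hv, Ne.symm hy]
      · simp [hv, Ne.symm hy]

-- index characterisation: the fold over js appends j to index[v] exactly when v ∈ var_sets[j]
theorem pv_index_fold_getD (var_sets : List (PySem.Set Int))
    (hnd : ∀ j, (var_sets.getD j []).Nodup) :
    ∀ (js : List Nat) (d : PySem.Dict Int (List Nat)) (v : Int),
      ((js.foldl (fun d j =>
          (var_sets.getD j []).foldl (fun d v => d.modify v [] (fun l => l ++ [j])) d) d)).getD v []
      = d.getD v [] ++ js.filter (fun j => (var_sets.getD j []).contains v) := by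
  intro js
  induction js with
  | nil => intro d v; simp
  | cons j js ih =>
    intro d v
    rw [List.foldl_cons, ih]
    have hinner : ((var_sets.getD j []).foldl (fun d v => d.modify v [] (fun l => l ++ [j])) d).getD v []
        = d.getD v [] ++ (if v ∈ var_sets.getD j [] then [j] else []) := by
      rw [show (var_sets.getD j []).foldl (fun d v => d.modify v [] (fun l => l ++ [j])) d
            = ((var_sets.getD j []).map (fun v => (v, j))).foldl
                (fun d p => d.modify p.1 [] (fun l => l ++ [p.2])) d by
            rw [List.foldl_map]]
      rw [PySem.Dict.getD_foldl_modify_append]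
      congr 1
      rw [List.filter_map]
      rw [show ((fun p => p.1 == v) ∘ (fun v' => (v', j))) = (fun y => y == v) from rfl]
      rw [pv_filter_beq_of_nodup _ (hnd j) v]
      by_cases hv : v ∈ var_sets.getD j []
      · have hv' := hv; rw [List.getD_eq_getElem?_getD] at hv'; simp [hv']
      · have hv' := hv; rw [List.getD_eq_getElem?_getD] at hv'; simp [hv']
    rw [hinner, List.filter_cons]
    by_cases hv : v ∈ var_sets.getD j []
    · have hcv : ((var_sets.getD j []).contains v) = true := by
        simpa [PySem.Set.contains_iff] using hv
      have hv' := hv; rw [List.getD_eq_getElem?_getD] at hv'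
      simp [hv', List.append_assoc]
    · have hcv : ((var_sets.getD j []).contains v) = false := by
        simp only [PySem.Set.contains_eq_listContains]
        simpa using hv
      have hv' := hv; rw [List.getD_eq_getElem?_getD] at hv'
      simp [hv']

theorem pv_index_getD (clauses : List (List Int)) (v : Int) :
    (pvBIndex clauses.length (pvVarSets clauses)).getD v []
      = (List.range clauses.length).filter
          (fun j => ((pvVarSets clauses).getD j []).contains v) := by
  rw [pvBIndex, pv_index_fold_getD _ (pv_varsets_nodup clauses)]
  simp

-- the increment loop: length preserved and pointwise value = old + count
theorem pv_inc_fold_length (js : List Nat) (c : List Int) :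
    (js.foldl (fun c j => c.set j (c.getD j 0 + 1)) c).length = c.length := by
  induction js generalizing c with
  | nil => rfl
  | cons j js ih => rw [List.foldl_cons, ih]; simp

theorem pv_inc_fold_getD (js : List Nat) (c : List Int) (t : Nat)
    (ht : t < c.length) (hjs : ∀ j ∈ js, j < c.length) :
    (js.foldl (fun c j => c.set j (c.getD j 0 + 1)) c).getD t 0
      = c.getD t 0 + (js.count t : Int) := by
  induction js generalizing c with
  | nil => simp
  | cons j js ih =>
    rw [List.foldl_cons]
    have hjc : j < c.length := hjs j (by simp)
    have hlen : (c.set j (c.getD j 0 + 1)).length = c.length := by simp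
    rw [ih (c.set j (c.getD j 0 + 1)) (by omega) (fun j' hj' => by rw [hlen]; exact hjs j' (by simp [hj']))]
    by_cases hjt : j = t
    · subst hjt
      rw [show (c.set j (c.getD j 0 + 1)).getD j 0 = c.getD j 0 + 1 by
        simp [List.getD_eq_getElem?_getD, hjc]]
      rw [List.count_cons_self]
      push_cast; ring
    · rw [show (c.set j (c.getD j 0 + 1)).getD t 0 = c.getD t 0 by
        rw [List.getD_eq_getElem?_getD, List.getElem?_set_ne hjt, ← List.getD_eq_getElem?_getD]]
      simp [hjt]

-- count of t in the index list for v: 1 iff v ∈ var_sets[t]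
theorem pv_index_count (clauses : List (List Int)) (v : Int) (t : Nat) (ht : t < clauses.length) :
    (((pvBIndex clauses.length (pvVarSets clauses)).getD v []).count t : Int)
      = if ((pvVarSets clauses).getD t []).contains v then 1 else 0 := by
  rw [pv_index_getD]
  have hnd : ((List.range clauses.length).filter
      (fun j => ((pvVarSets clauses).getD j []).contains v)).Nodup :=
    (List.nodup_range).filter _
  by_cases hc : ((pvVarSets clauses).getD t []).contains v
  · have hmem : t ∈ (List.range clauses.length).filter
        (fun j => ((pvVarSets clauses).getD j []).contains v) := by
      rw [List.mem_filter]; exact ⟨List.mem_range.2 ht, hc⟩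
    rw [if_pos hc]
    have := List.count_eq_one_of_mem hnd hmem
    rw [this]; rfl
  · have hmem : t ∉ (List.range clauses.length).filter
        (fun j => ((pvVarSets clauses).getD j []).contains v) := by
      rw [List.mem_filter]; intro h; exact hc h.2
    rw [if_neg hc, List.count_eq_zero_of_not_mem hmem]; rfl

-- elements of the index lists are valid positions
theorem pv_index_bound (clauses : List (List Int)) (v : Int) (j : Nat)
    (hj : j ∈ (pvBIndex clauses.length (pvVarSets clauses)).getD v []) : j < clauses.length := by
  rw [pv_index_getD] at hj
  exact List.mem_range.1 (List.mem_of_mem_filter hj)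

-- counts characterisation: counts[t] is the number of list entries of c_vars in var_sets[t]
theorem pv_counts_fold (clauses : List (List Int)) (L : List Int) (t : Nat)
    (ht : t < clauses.length) :
    ∀ (c : List Int), c.length = clauses.length →
      (L.foldl (fun c v =>
        (((pvBIndex clauses.length (pvVarSets clauses)).getD v []).foldl
          (fun c j => c.set j (c.getD j 0 + 1)) c)) c).getD t 0
      = c.getD t 0 + ((L.filter (fun v => ((pvVarSets clauses).getD t []).contains v)).length : Int) := by
  induction L with
  | nil => intro c _; simp
  | cons v L ih =>
    intro c hc
    rw [List.foldl_cons]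
    set c1 := ((pvBIndex clauses.length (pvVarSets clauses)).getD v []).foldl
      (fun c j => c.set j (c.getD j 0 + 1)) c with hc1
    have hlen1 : c1.length = clauses.length := by rw [hc1, pv_inc_fold_length, hc]
    rw [ih c1 hlen1, hc1,
        pv_inc_fold_getD _ c t (by omega) (fun j hj => by rw [hc]; exact pv_index_bound clauses v j hj),
        pv_index_count clauses v t ht, List.filter_cons]
    by_cases hv : ((pvVarSets clauses).getD t []).contains v
    · have hm : v ∈ (pvVarSets clauses).getD t [] := by
        simpa [PySem.Set.contains_iff] using hv
      rw [List.getD_eq_getElem?_getD] at hm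
      simp [hm]
      ring
    · have hm : v ∉ (pvVarSets clauses).getD t [] := by
        simp only [PySem.Set.contains_eq_listContains] at hv
        simpa using hv
      rw [List.getD_eq_getElem?_getD] at hm
      simp [hm]

theorem pv_counts_getD (clauses : List (List Int)) (c_vars : PySem.Set Int) (t : Nat)
    (ht : t < clauses.length) :
    (pvBCounts (pvBIndex clauses.length (pvVarSets clauses)) clauses.length c_vars).getD t 0
      = ((c_vars.filter (fun v => ((pvVarSets clauses).getD t []).contains v)).length : Int) := by
  rw [pvBCounts, pv_counts_fold clauses c_vars t ht _ (by simp)]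
  simp [List.getD_eq_getElem?_getD, ht]

-- branch-shape normalisation: nested if = conjunctive if
theorem pv_if_and (u : Bool) (o : Int) (bm : Int × Int) (j : Nat) :
    (if !u then if o > bm.2 then ((j : Int), o) else bm else bm)
      = (if !u && decide (o > bm.2) then ((j : Int), o) else bm) := by
  cases u <;> by_cases h : o > bm.2 <;> simp [h]

-- the two selection scans agree
theorem pv_select_eq (clauses : List (List Int)) (used : List Bool) (c_vars : PySem.Set Int) :
    pvASelect clauses used c_vars
      = pvBSelect used (pvBCounts (pvBIndex clauses.length (pvVarSets clauses)) clauses.length c_vars)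
          clauses.length := by
  rw [pvASelect, pvBSelect]
  apply PySem.List.foldl_congr_mem
  intro bm j hj
  have hjn : j < clauses.length := List.mem_range.1 hj
  have ho : ((PySem.Set.inter c_vars (PySem.Set.ofList ((clauses.getD j []).map (fun x => |x|)))).length : Int)
      = (pvBCounts (pvBIndex clauses.length (pvVarSets clauses)) clauses.length c_vars).getD j 0 := by
    rw [pv_counts_getD clauses c_vars j hjn, ← pv_varsets_getD clauses j]
    rfl
  dsimp only
  rw [ho]
  exact pv_if_and (used.getD j false)
    ((pvBCounts (pvBIndex clauses.length (pvVarSets clauses)) clauses.length c_vars).getD j 0) bm j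


-- B's round state tracks A's: same curr and used, c_vars = pvAVars curr, done ⇒ no candidate
def pvRel (clauses : List (List Int)) (a : List (List Int) × List Bool)
    (b : List (List Int) × PySem.Set Int × List Bool × Bool) : Prop :=
  b.1 = a.1 ∧ b.2.1 = pvAVars a.1 ∧ b.2.2.1 = a.2 ∧
    (b.2.2.2 = true → (pvASelect clauses a.2 (pvAVars a.1)).1 = -1)

theorem pv_round_rel (clauses : List (List Int)) (curr : List (List Int))
    (used : List Bool) (done : Bool)
    (hdone : done = true → (pvASelect clauses used (pvAVars curr)).1 = -1) :
    pvRel clauses (pvARound clauses (curr, used))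
      (pvBRound clauses (pvVarSets clauses) (pvBIndex clauses.length (pvVarSets clauses))
        clauses.length (curr, pvAVars curr, used, done)) := by
  cases done with
  | true =>
    have hsel := hdone rfl
    have hA : pvARound clauses (curr, used) = (curr, used) := by
      rw [pvARound]; simp [hsel]
    have hB : pvBRound clauses (pvVarSets clauses) (pvBIndex clauses.length (pvVarSets clauses))
        clauses.length (curr, pvAVars curr, used, true) = (curr, pvAVars curr, used, true) := by
      rw [pvBRound]; simp
    rw [hA, hB]
    exact ⟨rfl, rfl, rfl, fun _ => hsel⟩
  | false =>
    have hBstart : pvBRound clauses (pvVarSets clauses) (pvBIndex clauses.length (pvVarSets clauses))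
        clauses.length (curr, pvAVars curr, used, false)
      = (if (pvASelect clauses used (pvAVars curr)).1 = -1 then (curr, pvAVars curr, used, true)
         else (curr ++ [clauses.getD (pvASelect clauses used (pvAVars curr)).1.toNat []],
               PySem.Set.union (pvAVars curr)
                 ((pvVarSets clauses).getD (pvASelect clauses used (pvAVars curr)).1.toNat []),
               used.set (pvASelect clauses used (pvAVars curr)).1.toNat true, false)) := by
      rw [pvBRound]
      simp only [Bool.false_eq_true, if_false]
      rw [← pv_select_eq clauses used (pvAVars curr)]
    by_cases hneg : (pvASelect clauses used (pvAVars curr)).1 = -1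
    · rw [hBstart, if_pos hneg]
      have hA : pvARound clauses (curr, used) = (curr, used) := by
        rw [pvARound]; simp [hneg]
      rw [hA]
      exact ⟨rfl, rfl, rfl, fun _ => hneg⟩
    · rw [hBstart, if_neg hneg]
      have hA : pvARound clauses (curr, used)
          = (curr ++ [clauses.getD (pvASelect clauses used (pvAVars curr)).1.toNat []],
             used.set (pvASelect clauses used (pvAVars curr)).1.toNat true) := by
        rw [pvARound]; simp [hneg]
      rw [hA]
      refine ⟨rfl, ?_, rfl, by simp⟩
      simp only
      rw [pvAVars_append, pv_varsets_getD, ← pv_update_ofList]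
      rfl

-- the per-index outer steps agree pointwise
theorem pv_step_eq (clauses : List (List Int))
    (st : List Bool × List (List (List Int))) (i : Nat) :
    (if st.1.getD i false then st
     else
       let st2 := (List.range 2).foldl (fun s _ => pvARound clauses s)
         ([clauses.getD i []], st.1.set i true)
       (st2.2, st.2 ++ [st2.1]))
    = (if st.1.getD i false then st
       else
         let bst := (List.range 2).foldl
           (fun s _ => pvBRound clauses (pvVarSets clauses)
              (pvBIndex clauses.length (pvVarSets clauses)) clauses.length s)
           ([clauses.getD i []], (pvVarSets clauses).getD i [], st.1.set i true, false)
         (bst.2.2.1, st.2 ++ [bst.1])) := by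
  by_cases hu : st.1.getD i false
  · rw [if_pos hu, if_pos hu]
  · rw [if_neg hu, if_neg hu]
    rw [show (List.range 2) = [0, 1] from rfl]
    simp only [List.foldl_cons, List.foldl_nil]
    rw [show (pvVarSets clauses).getD i [] = pvAVars [clauses.getD i []] by
      rw [pv_varsets_getD, pvAVars_single]]
    obtain ⟨e1, e2, e3, e4⟩ :=
      pv_round_rel clauses [clauses.getD i []] (st.1.set i true) false (by simp)
    set a1 := pvARound clauses ([clauses.getD i []], st.1.set i true) with ha1
    set b1 := pvBRound clauses (pvVarSets clauses) (pvBIndex clauses.length (pvVarSets clauses))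
      clauses.length ([clauses.getD i []], pvAVars [clauses.getD i []], st.1.set i true, false) with hb1def
    have hb1 : b1 = (a1.1, pvAVars a1.1, a1.2, b1.2.2.2) := by
      rw [← e2, ← e3, ← e1]
    rw [hb1]
    obtain ⟨f1, _, f3, _⟩ := pv_round_rel clauses a1.1 a1.2 b1.2.2.2 e4
    rw [f1, f3]

-- ===== VERDICT (by name: the statement is the Claim_ definition above) =====
theorem get_triplets_spec : Claim_equal_get_triplets := by
  intro clauses _
  unfold Spec_get_triplets
  rw [get_triplets, get_triplets_alt]
  simp only
  congr 1
  exact PySem.List.foldl_congr_mem _ _ _ _ (fun st i _ => pv_step_eq clauses st i)
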